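-- pv_equiv track=rewrite | github.com/acesrg/nyquist | examples/calibration.py | ignore_initial_step
-- ===== SOURCE A (Python) =====
-- def ignore_initial_step(db, min_angle):
--     ret = []
--     for data in db:
--         if data['angle'] == min_angle:
--             ret = []
--
--         else:
--             ret.append(data)
--     return ret
-- ===== SOURCE B (Python) =====
-- def ignore_initial_step(db, min_angle):
--     out = []
--     for data in reversed(db):
--         if data['angle'] == min_angle:
--             break
--         out.append(data)
--     out.reverse()
--     return out
-- ===== Notes on version B (the rewrite author's own statement) =====
-- stated objective: alternative
-- what changed: Replaces the reset-accumulator forward loop with a reverse scan that collects elements until the first (i.e. last overall) min_angle occurrence, then reverses; the result is the suffix after the last occurrence.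
import Mathlib
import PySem

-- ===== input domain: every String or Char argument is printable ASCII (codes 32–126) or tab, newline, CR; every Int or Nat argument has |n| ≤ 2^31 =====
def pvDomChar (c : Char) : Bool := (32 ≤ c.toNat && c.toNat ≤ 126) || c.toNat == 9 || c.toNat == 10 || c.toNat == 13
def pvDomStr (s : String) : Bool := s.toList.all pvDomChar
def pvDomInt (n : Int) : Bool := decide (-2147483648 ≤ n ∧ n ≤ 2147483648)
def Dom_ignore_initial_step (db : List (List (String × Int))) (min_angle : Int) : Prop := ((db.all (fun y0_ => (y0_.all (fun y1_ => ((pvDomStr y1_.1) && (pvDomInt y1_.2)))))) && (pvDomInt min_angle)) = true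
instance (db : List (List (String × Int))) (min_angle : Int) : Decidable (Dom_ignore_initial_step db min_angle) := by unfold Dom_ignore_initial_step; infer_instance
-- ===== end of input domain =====

-- B replaces A's reset-accumulator forward loop by a reverse scan that stops at the
-- last min_angle occurrence; equal return values on all inputs whose dicts carry 'angle'.

-- ===== PORT A =====
-- A: forward loop, ret := [] on a match, ret.append(data) otherwise.
def ignore_initial_step (db : List (List (String × Int))) (min_angle : Int) : List (List (String × Int)) :=
  db.foldl
    (fun ret data =>
      if data.lookup "angle" = some min_angle then [] else ret ++ [data])
    []

-- ===== PORT B =====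
-- B: walk db reversed, append until the first element whose angle == min_angle (break), then reverse.
def pvAltLoop (min_angle : Int) : List (List (String × Int)) → List (List (String × Int)) → List (List (String × Int))
  | [], out => out
  | data :: rest, out =>
    if data.lookup "angle" = some min_angle then out
    else pvAltLoop min_angle rest (out ++ [data])

def ignore_initial_step_alt (db : List (List (String × Int))) (min_angle : Int) : List (List (String × Int)) :=
  (pvAltLoop min_angle db.reverse []).reverse

-- ===== PRECONDITION & SPEC =====
-- Pre_ excludes exactly the inputs where the Python A raises KeyError: a dict without the 'angle' key.
def Pre_ignore_initial_step (db : List (List (String × Int))) (min_angle : Int) : Prop :=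
  ∀ d ∈ db, (d.lookup "angle").isSome = true
instance (db : List (List (String × Int))) (min_angle : Int) : Decidable (Pre_ignore_initial_step db min_angle) := by
  unfold Pre_ignore_initial_step; infer_instance
def pvWitness_ignore_initial_step : (List (List (String × Int))) × Int :=
  ([[("angle", 1)], [("angle", 0)], [("angle", 2)]], 0)

def Spec_ignore_initial_step (db : List (List (String × Int))) (min_angle : Int) (out : List (List (String × Int))) : Prop := out = ignore_initial_step_alt db min_angle
instance (db : List (List (String × Int))) (min_angle : Int) (out : List (List (String × Int))) : Decidable (Spec_ignore_initial_step db min_angle out) := by unfold Spec_ignore_initial_step; infer_instance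

-- ===== CLAIM (what is proved, stated in full; the proofs are below) =====
def Claim_equal_ignore_initial_step : Prop := ∀ (db : List (List (String × Int))) (min_angle : Int), Dom_ignore_initial_step db min_angle → Pre_ignore_initial_step db min_angle → Spec_ignore_initial_step db min_angle (ignore_initial_step db min_angle)

-- ===== LEMMAS AND PROOFS =====
def pvKeep (m : Int) (d : List (String × Int)) : Bool := !(d.lookup "angle" == some m)

theorem pvA_takeWhile (db : List (List (String × Int))) (m : Int) :
    ignore_initial_step db m = ((db.reverse.takeWhile (pvKeep m)).reverse) := by
  induction db using List.reverseRecOn with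
  | nil => rfl
  | append_singleton db d ih =>
    simp only [ignore_initial_step, List.foldl_append, List.foldl_cons, List.foldl_nil,
      List.reverse_append, List.reverse_singleton, List.singleton_append, List.takeWhile_cons]
    by_cases h : d.lookup "angle" = some m
    · simp [pvKeep, h]
    · simpa [pvKeep, h] using congrArg (· ++ [d]) (by simpa [ignore_initial_step] using ih)

theorem pvAlt_takeWhile (m : Int) (xs out : List (List (String × Int))) :
    pvAltLoop m xs out = out ++ xs.takeWhile (pvKeep m) := by
  induction xs generalizing out with
  | nil => simp [pvAltLoop]
  | cons d rest ih =>
    simp only [pvAltLoop, List.takeWhile_cons]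
    by_cases h : d.lookup "angle" = some m
    · simp [pvKeep, h]
    · simp [pvKeep, h, ih]

-- ===== VERDICT (by name: the statement is the Claim_ definition above) =====
theorem ignore_initial_step_spec : Claim_equal_ignore_initial_step := by
  intro db m _ _
  unfold Spec_ignore_initial_step ignore_initial_step_alt
  rw [pvAlt_takeWhile, pvA_takeWhile]
  simp
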